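-- pv_equiv track=rewrite | github.com/Ren-Xuan/LeetCode | 807-m-maxIncreaseKeepingSkyline.py | maxIncreaseKeepingSkyline2
-- ===== SOURCE A (Python) =====
-- def maxIncreaseKeepingSkyline2(grid):
--     m=len(grid)
--     n=len(grid[0])
--     h=[max(x) for x in grid]
--     v=[max([x[j] for x in grid]) for j in range(n)]
--     c=0
--     for i in range(m):
--         for j in range(n):
--             c+=min(h[i],v[j])-grid[i][j]
--     return c
-- ===== SOURCE B (Python) =====
-- def _count_le(sv, r):
--     # number of leading elements of the ascending list sv that are <= r
--     k = 0
--     for x in sv: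
--         if x > r:
--             break
--         k += 1
--     return k
--
--
-- def maxIncreaseKeepingSkyline2(grid):
--     n = len(grid[0])
--     # running column maxima (one pass over the rows)
--     col = grid[0]
--     for row in grid[1:]:
--         col = [max(a, b) for a, b in zip(col, row)]
--     # sort the column maxima and build prefix sums
--     sv = sorted(col)
--     pref = [0]
--     s = 0
--     for x in sv:
--         s += x
--         pref.append(s)
--     total = 0
--     for row in grid:
--         total += sum(row[:n])
--     # per row r: sum_j min(r, col[j]) = pref[k] + r*(n-k), k = #{col[j] <= r}
--     c = 0
--     for row in grid:
--         r = max(row)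
--         k = _count_le(sv, r)
--         c += pref[k] + r * (n - k)
--     return c - total
-- ===== Notes on version B (the rewrite author's own statement) =====
-- stated objective: alternative
-- what changed: A precomputes row and column maxima and sums min(h[i],v[j])-grid[i][j] per cell; B keeps running column maxima in one pass, sorts them with prefix sums, and for each row maximum r adds pref[k]+r*(n-k) where k counts column maxima <= r, finally subtracting the grid total.
import Mathlib
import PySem

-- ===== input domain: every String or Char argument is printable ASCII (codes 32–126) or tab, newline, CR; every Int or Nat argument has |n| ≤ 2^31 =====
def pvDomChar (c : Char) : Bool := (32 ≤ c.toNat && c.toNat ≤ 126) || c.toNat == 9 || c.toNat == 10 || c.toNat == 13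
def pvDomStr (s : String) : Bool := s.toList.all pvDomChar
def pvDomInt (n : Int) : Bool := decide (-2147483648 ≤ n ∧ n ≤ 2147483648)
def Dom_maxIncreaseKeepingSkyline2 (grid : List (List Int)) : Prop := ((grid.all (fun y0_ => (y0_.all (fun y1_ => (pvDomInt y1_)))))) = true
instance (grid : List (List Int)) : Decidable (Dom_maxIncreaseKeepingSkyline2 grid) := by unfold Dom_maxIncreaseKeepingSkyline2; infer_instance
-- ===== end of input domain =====

-- B replaces A's per-cell min over precomputed row/column maxima by a different decomposition:
-- running column maxima, sorted with prefix sums, a per-row count of column maxima ≤ the row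
-- maximum, minus the grid sum (objective: alternative; same asymptotic cost).

-- ===== PORT A =====
-- max(x) on a possibly empty list is Option in PySem; the `.getD 0` default is never reached under Pre_.
def maxIncreaseKeepingSkyline2 (grid : List (List Int)) : Int :=
  let m : Int := (grid.length : Int)
  let n : Int := ((PySem.List.pyGetD grid 0 []).length : Int)
  let h : List Int := grid.map (fun x => (PySem.List.max? x (fun y => y)).getD 0)
  let v : List Int := (PySem.List.pyRange 0 n).map
      (fun j => (PySem.List.max? (grid.map (fun x => PySem.List.pyGetD x j 0)) (fun y => y)).getD 0)
  (PySem.List.pyRange 0 m).foldl (fun c i =>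
    (PySem.List.pyRange 0 n).foldl (fun c j =>
      c + min (PySem.List.pyGetD h i 0) (PySem.List.pyGetD v j 0)
        - PySem.List.pyGetD (PySem.List.pyGetD grid i []) j 0) c) 0

-- ===== PORT B =====
-- port of Source B's _count_le: linear scan of the sorted list with early stop (`if x > r: break`)
def countLe_b : List Int → Int → Int
  | [], _ => 0
  | x :: t, r => if r < x then 0 else 1 + countLe_b t r

def maxIncreaseKeepingSkyline2_alt (grid : List (List Int)) : Int :=
  let n : Int := ((PySem.List.pyGetD grid 0 []).length : Int)
  let col : List Int := (PySem.List.slice grid (some 1) none).foldl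
      (fun col row => (col.zip row).map (fun p => max p.1 p.2)) (PySem.List.pyGetD grid 0 [])
  let sv : List Int := PySem.List.sorted col (fun x => x)
  let ps : List Int × Int := sv.foldl (fun st x => (st.1 ++ [st.2 + x], st.2 + x)) ([0], 0)
  let pref : List Int := ps.1
  let total : Int := grid.foldl (fun t row => t + (PySem.List.slice row none (some n)).sum) 0
  let c : Int := grid.foldl (fun c row =>
      let r := (PySem.List.max? row (fun y => y)).getD 0
      let k := countLe_b sv r
      c + PySem.List.pyGetD pref k 0 + r * (n - k)) 0
  c - total

-- ===== PRECONDITION & SPEC =====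
-- Pre_ excludes exactly the inputs where A raises: the empty grid (IndexError on grid[0]),
-- an empty first row (then max(x) of an empty row: ValueError), and a grid with some row
-- shorter than grid[0] (IndexError on x[j] in the column maxima).
def Pre_maxIncreaseKeepingSkyline2 (grid : List (List Int)) : Prop :=
  grid ≠ [] ∧ 0 < (grid.headD []).length ∧ ∀ row ∈ grid, (grid.headD []).length ≤ row.length
instance (grid : List (List Int)) : Decidable (Pre_maxIncreaseKeepingSkyline2 grid) := by unfold Pre_maxIncreaseKeepingSkyline2; infer_instance

def pvWitness_maxIncreaseKeepingSkyline2 : List (List Int) := [[3, 0, 8, 4], [2, 4, 5, 7], [9, 2, 6, 3], [0, 3, 1, 0]]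

def Spec_maxIncreaseKeepingSkyline2 (grid : List (List Int)) (out : Int) : Prop := out = maxIncreaseKeepingSkyline2_alt grid
instance (grid : List (List Int)) (out : Int) : Decidable (Spec_maxIncreaseKeepingSkyline2 grid out) := by unfold Spec_maxIncreaseKeepingSkyline2; infer_instance

-- ===== CLAIM (what is proved, stated in full; the proofs are below) =====
def Claim_equal_maxIncreaseKeepingSkyline2 : Prop := ∀ (grid : List (List Int)), Dom_maxIncreaseKeepingSkyline2 grid → Pre_maxIncreaseKeepingSkyline2 grid → Spec_maxIncreaseKeepingSkyline2 grid (maxIncreaseKeepingSkyline2 grid)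

-- ===== LEMMAS AND PROOFS =====

lemma sum_map_sub_int {α : Type} (l : List α) (f g : α → Int) :
    (l.map (fun x => f x - g x)).sum = (l.map f).sum - (l.map g).sum := by
  induction l with
  | nil => simp
  | cons a t ih => simp [ih]; ring

lemma take_map_getD_range (l : List Int) (n : Nat) (h : n ≤ l.length) :
    (List.range n).map (fun k => l.getD k 0) = l.take n := by
  apply List.ext_getElem
  · simp [h]
  · intro i h1 h2
    simp at h1 ⊢
    rw [List.getElem?_eq_getElem (by omega), Option.getD_some]

lemma pyGetD_map_rowmax (grid : List (List Int)) (i : Int) :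
    PySem.List.pyGetD (grid.map (fun x => (PySem.List.max? x (fun y => y)).getD 0)) i 0
      = (PySem.List.max? (PySem.List.pyGetD grid i []) (fun y => y)).getD 0 := by
  simpa using PySem.List.pyGetD_map (fun x => (PySem.List.max? x (fun y => y)).getD 0) grid i []

-- A's column-maxima comprehension, written as per-index running maxima
lemma v_eq (g0 : List Int) (rest : List (List Int)) :
    (PySem.List.pyRange 0 (g0.length : Int)).map
      (fun j => (PySem.List.max? ((g0 :: rest).map (fun x => PySem.List.pyGetD x j 0)) (fun y => y)).getD 0)
    = (List.range g0.length).map (fun j => rest.foldl (fun a r => max a (r.getD j 0)) (g0.getD j 0)) := by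
  rw [PySem.List.pyRange_zero_nat, List.map_map]
  apply List.map_congr_left
  intro k hk
  simp only [Function.comp_apply, List.map_cons, PySem.List.pyGetD_natCast,
    PySem.List.max?_id_cons, Option.getD_some, List.foldl_map]

-- A's double loop evaluates to Σ_rows Σ_j min(rowmax, colmax_j) − Σ_rows Σ_{j<n} row[j]
lemma A_eval (g0 : List Int) (rest : List (List Int))
    (hrows : ∀ row ∈ g0 :: rest, g0.length ≤ row.length) :
    maxIncreaseKeepingSkyline2 (g0 :: rest) =
      ((g0 :: rest).map (fun row =>
        (((List.range g0.length).map (fun j => rest.foldl (fun a r => max a (r.getD j 0)) (g0.getD j 0))).map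
          (fun x => min ((PySem.List.max? row (fun y => y)).getD 0) x)).sum)).sum
      - ((g0 :: rest).map (fun row => (row.take g0.length).sum)).sum := by
  set V := (List.range g0.length).map (fun j => rest.foldl (fun a r => max a (r.getD j 0)) (g0.getD j 0)) with hV
  simp only [maxIncreaseKeepingSkyline2, PySem.List.pyGetD_zero_cons, pyGetD_map_rowmax, v_eq, ← hV]
  rw [PySem.List.foldl_pyRange_zero_pyGetD' (g0 :: rest) []
      (f := fun c row => (PySem.List.pyRange 0 (g0.length : Int)).foldl (fun c j =>
        c + min ((PySem.List.max? row (fun y => y)).getD 0) (PySem.List.pyGetD V j 0)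
          - PySem.List.pyGetD row j 0) c) 0]
  have hVlen : V.length = g0.length := by simp [hV]
  have hG : ∀ row ∈ (g0 :: rest), ∀ c : Int,
      (PySem.List.pyRange 0 (g0.length : Int)).foldl (fun c j =>
        c + min ((PySem.List.max? row (fun y => y)).getD 0) (PySem.List.pyGetD V j 0)
          - PySem.List.pyGetD row j 0) c
      = c + ((V.map (fun x => min ((PySem.List.max? row (fun y => y)).getD 0) x)).sum
              - (row.take g0.length).sum) := by
    intro row hrow c
    set r := (PySem.List.max? row (fun y => y)).getD 0 with hr
    rw [PySem.List.foldl_congr_mem (PySem.List.pyRange 0 (g0.length : Int))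
        (fun c j => c + min r (PySem.List.pyGetD V j 0) - PySem.List.pyGetD row j 0)
        (fun c j => c + (min r (PySem.List.pyGetD V j 0) - PySem.List.pyGetD row j 0)) c
        (by intro acc x _; ring)]
    rw [PySem.List.foldl_add (PySem.List.pyRange 0 (g0.length : Int))
        (fun j => min r (PySem.List.pyGetD V j 0) - PySem.List.pyGetD row j 0) c]
    congr 1
    rw [PySem.List.pyRange_zero_nat, List.map_map]
    have : ((fun j => min r (PySem.List.pyGetD V j 0) - PySem.List.pyGetD row j 0) ∘ (fun k : Nat => (k : Int)))
        = fun k : Nat => min r (V.getD k 0) - row.getD k 0 := by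
      funext k; simp
    rw [this, sum_map_sub_int]
    congr 1
    · rw [show (fun k : Nat => min r (V.getD k 0)) = (fun x => min r x) ∘ (fun k : Nat => V.getD k 0) from rfl,
        ← List.map_map, take_map_getD_range V g0.length (le_of_eq hVlen.symm),
        List.take_of_length_le (le_of_eq hVlen)]
    · rw [take_map_getD_range row g0.length (hrows row hrow)]
  rw [PySem.List.foldl_congr_mem' (g0 :: rest) _
      (fun c row => c + ((V.map (fun x => min ((PySem.List.max? row (fun y => y)).getD 0) x)).sum
              - (row.take g0.length).sum)) 0 hG,
    PySem.List.foldl_add (g0 :: rest)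
      (fun row => ((V.map (fun x => min ((PySem.List.max? row (fun y => y)).getD 0) x)).sum
              - (row.take g0.length).sum)) 0,
    sum_map_sub_int]
  simp

-- the prefix-sum loop of Source B
def runsums (s : Int) : List Int → List Int
  | [] => []
  | x :: t => (s + x) :: runsums (s + x) t

lemma pref_fold (sv : List Int) : ∀ (p : List Int) (s : Int),
    sv.foldl (fun st x => (st.1 ++ [st.2 + x], st.2 + x)) (p, s) = (p ++ runsums s sv, s + sv.sum) := by
  induction sv with
  | nil => intro p s; simp [runsums]
  | cons x t ih =>
      intro p s
      simp only [List.foldl_cons, ih, runsums, List.sum_cons]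
      rw [Prod.mk.injEq]
      exact ⟨by simp, by ring⟩

lemma pref_getD (sv : List Int) : ∀ (s : Int) (k : Nat), k ≤ sv.length →
    (s :: runsums s sv).getD k 0 = s + (sv.take k).sum := by
  induction sv with
  | nil =>
      intro s k hk
      have : k = 0 := by simpa using hk
      subst this; simp
  | cons x t ih =>
      intro s k hk
      cases k with
      | zero => simp
      | succ k =>
          simp only [runsums, List.getD_cons_succ, List.take_succ_cons, List.sum_cons]
          rw [ih (s + x) k (by simpa using hk)]
          ring

lemma countLe_eq (r : Int) (sv : List Int) :
    countLe_b sv r = ((sv.takeWhile (fun x => decide (x ≤ r))).length : Int) := by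
  induction sv with
  | nil => simp [countLe_b]
  | cons x t ih =>
      by_cases hx : r < x
      · simp [countLe_b, hx, show ¬ x ≤ r by omega]
      · simp [countLe_b, hx, show x ≤ r by omega, ih]
        ring

-- on an ascending list, Σ min(r, x) = (sum of the leading elements ≤ r) + r·(number of the rest)
lemma minsum (r : Int) : ∀ (sv : List Int), sv.Pairwise (· ≤ ·) →
    (sv.map (fun x => min r x)).sum =
      (sv.take (sv.takeWhile (fun x => decide (x ≤ r))).length).sum
        + r * ((sv.length : Int) - ((sv.takeWhile (fun x => decide (x ≤ r))).length : Int)) := by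
  intro sv
  induction sv with
  | nil => simp
  | cons x t ih =>
      intro hp
      rcases List.pairwise_cons.mp hp with ⟨hx, ht⟩
      by_cases hxr : x ≤ r
      · have : min r x = x := by omega
        simp only [List.map_cons, List.sum_cons, this,
          List.takeWhile_cons, show (decide (x ≤ r)) = true by simpa using hxr]
        simp only [if_true, List.length_cons, List.take_succ_cons, List.sum_cons, List.length_cons]
        rw [ih ht]
        push_cast
        ring
      · have hall : ∀ y ∈ x :: t, min r y = r := by
          intro y hy
          rcases List.mem_cons.mp hy with hy | hy
          · subst hy; omega
          · have := hx y hy; omega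
        rw [List.map_congr_left hall]
        simp only [List.takeWhile_cons, show (decide (x ≤ r)) = false by simpa using hxr]
        simp [List.map_const', List.sum_replicate]
        ring

-- the running column-maxima loop of Source B computes per-index running maxima
lemma colfold (rows : List (List Int)) : ∀ (col : List Int), (∀ row ∈ rows, col.length ≤ row.length) →
    rows.foldl (fun col row => (col.zip row).map (fun p => max p.1 p.2)) col =
      (List.range col.length).map (fun j => rows.foldl (fun a row => max a (row.getD j 0)) (col.getD j 0)) := by
  induction rows with
  | nil =>
      intro col _
      simpa using (take_map_getD_range col col.length le_rfl).symm
  | cons row rows ih =>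
      intro col hlen
      have hcr : col.length ≤ row.length := hlen row (by simp)
      have hstep : ((col.zip row).map (fun p => max p.1 p.2)).length = col.length := by
        simp [List.length_zip, Nat.min_eq_left hcr]
      simp only [List.foldl_cons]
      rw [ih _ (by intro r hr; rw [hstep]; exact hlen r (by simp [hr]))]
      rw [hstep]
      apply List.map_congr_left
      intro j hj
      have hj' : j < col.length := List.mem_range.mp hj
      have : ((col.zip row).map (fun p => max p.1 p.2)).getD j 0
            = max (col.getD j 0) (row.getD j 0) := by
        rw [List.getD_eq_getElem?_getD, List.getElem?_eq_getElem (by omega),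
            List.getD_eq_getElem?_getD, List.getElem?_eq_getElem (by omega),
            List.getD_eq_getElem?_getD, List.getElem?_eq_getElem (by omega)]
        simp [List.getElem_zip]
      rw [this]

-- B evaluates to the same normal form as A
lemma B_eval (g0 : List Int) (rest : List (List Int))
    (hrows : ∀ row ∈ g0 :: rest, g0.length ≤ row.length) :
    maxIncreaseKeepingSkyline2_alt (g0 :: rest) =
      ((g0 :: rest).map (fun row =>
        (((List.range g0.length).map (fun j => rest.foldl (fun a r => max a (r.getD j 0)) (g0.getD j 0))).map
          (fun x => min ((PySem.List.max? row (fun y => y)).getD 0) x)).sum)).sum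
      - ((g0 :: rest).map (fun row => (row.take g0.length).sum)).sum := by
  set V := (List.range g0.length).map (fun j => rest.foldl (fun a r => max a (r.getD j 0)) (g0.getD j 0)) with hV
  have hVlen : V.length = g0.length := by simp [hV]
  have hslice : PySem.List.slice (g0 :: rest) (some 1) none = rest := by
    rw [PySem.List.slice_from _ (by norm_num)]; simp
  have hcol : (PySem.List.slice (g0 :: rest) (some 1) none).foldl
      (fun col row => (col.zip row).map (fun p => max p.1 p.2)) g0 = V := by
    rw [hslice]
    exact colfold rest g0 (fun row hr => hrows row (by simp [hr]))
  simp only [maxIncreaseKeepingSkyline2_alt, PySem.List.pyGetD_zero_cons, hcol]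
  set sv := PySem.List.sorted V (fun x => x) with hsv
  have hsvlen : sv.length = g0.length := by
    rw [hsv, List.Perm.length_eq (PySem.List.sorted_perm V (fun x => x) false), hVlen]
  have hperm : ∀ r : Int, (sv.map (fun x => min r x)).sum = (V.map (fun x => min r x)).sum :=
    fun r => List.Perm.sum_eq ((PySem.List.sorted_perm V (fun x => x) false).map _)
  have hpair : sv.Pairwise (· ≤ ·) := PySem.List.sorted_pairwise V (fun x => x)
  have hps : (sv.foldl (fun st x => (st.1 ++ [st.2 + x], st.2 + x)) (([0] : List Int), (0 : Int))).1
      = [0] ++ runsums 0 sv := by rw [pref_fold]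
  rw [hps]
  -- the total loop
  rw [PySem.List.foldl_congr_mem' (g0 :: rest)
      (fun t row => t + (PySem.List.slice row none (some ((g0.length : Int)))).sum)
      (fun t row => t + (row.take g0.length).sum) 0
      (by
        intro row hrow t
        beta_reduce
        rw [PySem.List.slice_to row (b := (g0.length : Int)) (by positivity)]
        simp),
    PySem.List.foldl_add (g0 :: rest) (fun row => (row.take g0.length).sum) 0]
  -- the main accumulation loop
  rw [PySem.List.foldl_congr_mem' (g0 :: rest)
      (fun c row =>
        c + PySem.List.pyGetD ([0] ++ runsums 0 sv)
              (countLe_b sv ((PySem.List.max? row (fun y => y)).getD 0)) 0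
          + ((PySem.List.max? row (fun y => y)).getD 0)
            * ((g0.length : Int) - countLe_b sv ((PySem.List.max? row (fun y => y)).getD 0)))
      (fun c row => c + (V.map (fun x => min ((PySem.List.max? row (fun y => y)).getD 0) x)).sum) 0
      (by
        intro row hrow c
        beta_reduce
        set r := (PySem.List.max? row (fun y => y)).getD 0 with hr
        set kw := (sv.takeWhile (fun x => decide (x ≤ r))).length with hkw
        have hkle : kw ≤ sv.length := by rw [hkw]; exact (sv.takeWhile_prefix _).length_le
        have h1 : countLe_b sv r = (kw : Int) := countLe_eq r sv
        have h2 : PySem.List.pyGetD ([0] ++ runsums 0 sv) (countLe_b sv r) 0 = (sv.take kw).sum := by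
          rw [h1, PySem.List.pyGetD_natCast]
          simpa using pref_getD sv 0 kw hkle
        rw [h2, h1, ← hperm r, minsum r sv hpair, ← hkw, hsvlen]
        ring),
    PySem.List.foldl_add (g0 :: rest)
      (fun row => (V.map (fun x => min ((PySem.List.max? row (fun y => y)).getD 0) x)).sum) 0]
  simp

-- ===== VERDICT (by name: the statement is the Claim_ definition above) =====
theorem maxIncreaseKeepingSkyline2_spec : Claim_equal_maxIncreaseKeepingSkyline2 := by
  intro grid _ hPre
  obtain ⟨hne, hn0, hrows⟩ := hPre
  cases grid with
  | nil => exact absurd rfl hne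
  | cons g0 rest =>
      have hrows' : ∀ row ∈ g0 :: rest, g0.length ≤ row.length := by simpa using hrows
      unfold Spec_maxIncreaseKeepingSkyline2
      rw [A_eval g0 rest hrows', B_eval g0 rest hrows']
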